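-- pv_equiv track=rewrite | github.com/Lucas-Da-Silveira/BUT-Info | 1-année/S1/TP/MathsDiscrete/TP3/TP3.py | racine
-- ===== SOURCE A (Python) =====
-- def racine(n):
--     a = 1
--     b = n
--     while b%4==0:
--         a*=2
--         b//=4
--     d = 3
--     while d*d <= b:
--         if b%(d*d)== 0:
--             b//=d*d
--             a*=d
--         else:
--             d+=2
--     return a,b
-- ===== SOURCE B (Python) =====
-- def racine(n):
--     a = 1
--     b = 1
--     m = n
--     d = 2
--     while d * d <= m:
--         e = 0
--         while m % d == 0:
--             m //= d
--             e += 1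
--         a *= d ** (e // 2)
--         b *= d ** (e % 2)
--         d += 1
--     if m != 1:
--         b *= m
--     return a, b
-- ===== Notes on version B (the rewrite author's own statement) =====
-- stated objective: alternative
-- what changed: B computes the full trial-division prime factorization once (counting each prime's exponent e, then multiplying d**(e//2) into the root and d**(e%2) into the squarefree part) instead of A's repeated peeling of square factors d*d from the number.
-- intended difference: On negative multiples of 4, A still strips factors of 4 (e.g. racine(-4) = (2,-1)) but never reduces odd square factors, an artefact of its %4 loop; B treats any negative n uniformly as having no extractable square and returns (1, n), the consistent choice on this unspecified corner. — e.g. on racine(-4): A returns (2, -1), B returns (1, -4)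
-- outside the precondition, e.g. on racine(0): A does not finish within the time limit, B returns (1, 0)
import Mathlib
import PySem

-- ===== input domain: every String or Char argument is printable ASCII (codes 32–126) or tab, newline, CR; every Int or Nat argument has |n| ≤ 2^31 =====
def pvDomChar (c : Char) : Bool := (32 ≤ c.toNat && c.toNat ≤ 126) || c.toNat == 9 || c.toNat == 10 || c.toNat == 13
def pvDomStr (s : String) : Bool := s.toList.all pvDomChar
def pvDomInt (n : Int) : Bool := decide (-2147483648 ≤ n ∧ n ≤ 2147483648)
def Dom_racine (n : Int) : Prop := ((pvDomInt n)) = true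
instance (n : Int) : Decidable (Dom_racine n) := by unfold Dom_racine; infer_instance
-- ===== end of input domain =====

-- B replaces A's repeated peeling of square factors d*d by one trial-division prime
-- factorization, splitting each prime exponent e into d^(e/2) (root) and d^(e%2) (rest).

-- ===== PORT A =====
-- while b%4==0: a*=2; b//=4     (fuel makes the loop total; for n ≠ 0 the fuel is never exhausted)
def racineLoop4 : Nat → Int → Int → Int × Int
  | 0, a, b => (a, b)
  | fuel+1, a, b =>
    if PySem.Int.mod b 4 = 0 then racineLoop4 fuel (a * 2) (PySem.Int.floordiv b 4)
    else (a, b)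

-- while d*d <= b: if b%(d*d)==0: b//=d*d; a*=d else: d+=2
def racineLoopD : Nat → Int → Int → Int → Int × Int
  | 0, a, b, _ => (a, b)
  | fuel+1, a, b, d =>
    if d * d ≤ b then
      if PySem.Int.mod b (d * d) = 0 then racineLoopD fuel (a * d) (PySem.Int.floordiv b (d * d)) d
      else racineLoopD fuel a b (d + 2)
    else (a, b)

def racine (n : Int) : Int × Int :=
  let p := racineLoop4 (n.natAbs + 1) 1 n
  racineLoopD (2 * n.natAbs + 4) p.1 p.2 3

-- ===== PORT B =====
-- inner loop: while m % d == 0: m //= d; e += 1   (returns (final m, e))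
def altStrip : Nat → Int → Int → Int × Nat
  | 0, m, _ => (m, 0)
  | fuel+1, m, d =>
    if PySem.Int.mod m d = 0 then
      let p := altStrip fuel (PySem.Int.floordiv m d) d
      (p.1, p.2 + 1)
    else (m, 0)

-- outer loop: while d*d <= m: …; d += 1   (state (a, b, m))
def altLoop : Nat → Int → Int → Int → Int → Int × Int × Int
  | 0, a, b, m, _ => (a, b, m)
  | fuel+1, a, b, m, d =>
    if d * d ≤ m then
      let p := altStrip (m.natAbs + 1) m d
      altLoop fuel (a * d ^ (p.2 / 2)) (b * d ^ (p.2 % 2)) p.1 (d + 1)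
    else (a, b, m)

def racine_alt (n : Int) : Int × Int :=
  let t := altLoop (n.natAbs + 2) 1 1 n 2
  if t.2.2 ≠ 1 then (t.1, t.2.1 * t.2.2) else (t.1, t.2.1)

-- ===== PRECONDITION & SPEC =====
-- Pre_ excludes only n = 0, on which A's while-loop never terminates (B returns (1, 0)).
def Pre_racine (n : Int) : Prop := n ≠ 0
instance (n : Int) : Decidable (Pre_racine n) := by unfold Pre_racine; infer_instance
def pvWitness_racine : Int := 12

-- On negative multiples of 4, A still strips factors of 4 (racine(-4) = (2,-1)) but never
-- reduces odd square factors — an artefact of its %4 loop; B treats any negative n uniformly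
-- as having no extractable square and returns (1, n), the consistent choice on this
-- unspecified corner.
def D_racine (n : Int) : Prop := n < 0 ∧ (4 : Int) ∣ n
instance (n : Int) : Decidable (D_racine n) := by unfold D_racine; infer_instance

def Spec_racine (n : Int) (out : Int × Int) : Prop := ¬ D_racine n → out = racine_alt n
instance (n : Int) (out : Int × Int) : Decidable (Spec_racine n out) := by unfold Spec_racine; infer_instance

def pvDiffWitness_racine : Int := -4
def pvDiffWitnessOut_racine : (Int × Int) × (Int × Int) := ((2, -1), (1, -4))

-- ===== CLAIM (what is proved, stated in full; the proofs are below) =====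
def Claim_unchanged_racine : Prop := ∀ (n : Int), Dom_racine n → Pre_racine n → Spec_racine n (racine n)
def Claim_changed_racine : Prop := Dom_racine (pvDiffWitness_racine) ∧ Pre_racine (pvDiffWitness_racine) ∧ D_racine (pvDiffWitness_racine) ∧ racine (pvDiffWitness_racine) = pvDiffWitnessOut_racine.1 ∧ racine_alt (pvDiffWitness_racine) = pvDiffWitnessOut_racine.2 ∧ pvDiffWitnessOut_racine.1 ≠ pvDiffWitnessOut_racine.2
def Claim_exact_racine : Prop := ∀ (n : Int), Dom_racine n → Pre_racine n → D_racine n → racine n ≠ racine_alt n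

-- ===== LEMMAS AND PROOFS =====
-- ===== basic divisibility helpers =====
lemma fd_mul_cancel {a d : Int} (h : d ∣ a) : PySem.Int.floordiv a d * d = a := by
  have h1 := PySem.Int.floordiv_mul_add_mod a d
  have h2 : PySem.Int.mod a d = 0 := (PySem.Int.mod_eq_zero_iff_dvd a d).mpr h
  rw [h2] at h1; simpa using h1

lemma fd_pos {a d : Int} (hd : 0 < d) (h : d ∣ a) (ha : 0 < a) : 0 < PySem.Int.floordiv a d := by
  have h1 := fd_mul_cancel h
  nlinarith [h1]

lemma fd_lt {a d : Int} (hd : 1 < d) (h : d ∣ a) (ha : 0 < a) : PySem.Int.floordiv a d < a := by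
  have h1 := fd_mul_cancel h
  have h2 : 0 < PySem.Int.floordiv a d := fd_pos (by omega) h ha
  nlinarith [h1]

lemma fd_dvd {a d : Int} (h : d ∣ a) : PySem.Int.floordiv a d ∣ a :=
  ⟨d, (fd_mul_cancel h).symm⟩

lemma fd_neg {a d : Int} (hd : 0 < d) (ha : a < 0) : PySem.Int.floordiv a d < 0 := by
  have h1 := PySem.Int.floordiv_mul_add_mod a d
  have h2 := PySem.Int.mod_nonneg a hd
  have h3 := PySem.Int.mod_lt a hd
  nlinarith [h1]

-- a prime ≥ 2 is 2 or odd
lemma int_prime_two_or_odd (p : Int) (h2 : 2 ≤ p) (hp : Prime p) : p = 2 ∨ p % 2 = 1 := by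
  by_cases h : (2:Int) ∣ p
  · left
    have := (Nat.prime_dvd_prime_iff_eq Nat.prime_two (Int.prime_iff_natAbs_prime.mp hp)).mp
      (by simpa using Int.natAbs_dvd_natAbs.mpr h)
    omega
  · right; omega

lemma int_exists_prime_lt (d : Int) (h : 2 ≤ d) (hnp : ¬ Prime d) :
    ∃ q : Int, Prime q ∧ 2 ≤ q ∧ q < d ∧ q ∣ d := by
  have h1 : d.toNat ≠ 1 := by omega
  have hq := Nat.minFac_prime h1
  have hqd : (d.toNat.minFac : Int) ∣ d := by
    have h0 := Int.natCast_dvd_natCast.mpr (Nat.minFac_dvd d.toNat)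
    simpa [Int.toNat_of_nonneg (by omega : (0:Int) ≤ d)] using h0
  refine ⟨d.toNat.minFac, Nat.prime_iff_prime_int.mp hq, by exact_mod_cast hq.two_le, ?_, hqd⟩
  rcases lt_or_eq_of_le (Int.le_of_dvd (by omega) hqd) with hlt | heq
  · exact hlt
  · exact absurd (heq ▸ Nat.prime_iff_prime_int.mp hq) hnp

lemma int_prime_eq_of_dvd {p d : Int} (hp : Prime p) (hd : Prime d) (h2 : 2 ≤ p) (h2d : 2 ≤ d)
    (hdvd : p ∣ d) : p = d := by
  have h3 := (Nat.prime_dvd_prime_iff_eq (Int.prime_iff_natAbs_prime.mp hp)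
    (Int.prime_iff_natAbs_prime.mp hd)).mp (Int.natAbs_dvd_natAbs.mpr hdvd)
  omega

-- "no prime square divides" (positive primes suffice)
def SqfT (b : Int) : Prop := ∀ p : Int, 2 ≤ p → Prime p → ¬ (p * p ∣ b)

-- ===== A-side loop lemmas =====
lemma loop4_spec : ∀ fuel (a b : Int), 0 < a → 0 < b → b.natAbs ≤ fuel →
    0 < (racineLoop4 fuel a b).1 ∧ 0 < (racineLoop4 fuel a b).2 ∧
    (racineLoop4 fuel a b).1 ^ 2 * (racineLoop4 fuel a b).2 = a ^ 2 * b ∧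
    ¬ (4:Int) ∣ (racineLoop4 fuel a b).2 := by
  intro fuel
  induction fuel with
  | zero => intro a b ha hb hf; omega
  | succ f ih =>
    intro a b ha hb hf
    by_cases h4 : PySem.Int.mod b 4 = 0
    · have hdvd : (4:Int) ∣ b := (PySem.Int.mod_eq_zero_iff_dvd b 4).mp h4
      have hb' : 0 < PySem.Int.floordiv b 4 := fd_pos (by norm_num) hdvd hb
      have hlt : PySem.Int.floordiv b 4 < b := fd_lt (by norm_num) hdvd hb
      have hrec := ih (a * 2) (PySem.Int.floordiv b 4) (by positivity) hb' (by omega)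
      have heq : racineLoop4 (f+1) a b = racineLoop4 f (a * 2) (PySem.Int.floordiv b 4) := by
        simp only [racineLoop4, if_pos h4]
      rw [heq]
      refine ⟨hrec.1, hrec.2.1, ?_, hrec.2.2.2⟩
      rw [hrec.2.2.1,
        show (a * 2) ^ 2 * PySem.Int.floordiv b 4 =
          a ^ 2 * (PySem.Int.floordiv b 4 * 4) from by ring,
        fd_mul_cancel hdvd]
    · have heq : racineLoop4 (f+1) a b = (a, b) := by simp only [racineLoop4, if_neg h4]
      rw [heq]
      exact ⟨ha, hb, rfl, fun hc => h4 ((PySem.Int.mod_eq_zero_iff_dvd b 4).mpr hc)⟩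

lemma sqf_of_inv {b d : Int} (hb : 0 < b) (hd : 0 < d) (h4 : ¬ (4:Int) ∣ b)
    (hinv : ∀ e : Int, 3 ≤ e → e < d → e % 2 = 1 → ¬ (e * e ∣ b)) (hlt : b < d * d) :
    SqfT b := by
  intro p hp2 hpp hdvd
  have hple : p * p ≤ b := Int.le_of_dvd hb hdvd
  rcases int_prime_two_or_odd p hp2 hpp with rfl | hodd
  · exact h4 (by norm_num at hdvd ⊢; exact hdvd)
  · have hpd : p < d := by
      by_contra hcon
      have hcon' : d ≤ p := not_lt.mp hcon
      have : d * d ≤ p * p := mul_le_mul hcon' hcon' (by omega) (by omega)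
      linarith
    exact hinv p (by omega) hpd hodd hdvd

lemma loopD_spec : ∀ fuel (a b d : Int), 0 < a → 0 < b → 3 ≤ d → d % 2 = 1 →
    ¬ (4:Int) ∣ b → (∀ e : Int, 3 ≤ e → e < d → e % 2 = 1 → ¬ (e * e ∣ b)) →
    2 * b.natAbs + 3 ≤ fuel + d.toNat →
    0 < (racineLoopD fuel a b d).1 ∧ 0 < (racineLoopD fuel a b d).2 ∧
    (racineLoopD fuel a b d).1 ^ 2 * (racineLoopD fuel a b d).2 = a ^ 2 * b ∧
    SqfT (racineLoopD fuel a b d).2 := by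
  intro fuel
  induction fuel with
  | zero =>
    intro a b d ha hb hd3 hdo h4 hinv hf
    have hd : 2 * b + 3 ≤ d := by omega
    have hlt : b < d * d := by nlinarith
    exact ⟨ha, hb, rfl, sqf_of_inv hb (by omega) h4 hinv hlt⟩
  | succ f ih =>
    intro a b d ha hb hd3 hdo h4 hinv hf
    by_cases hle : d * d ≤ b
    · by_cases hm : PySem.Int.mod b (d * d) = 0
      · have hdvd : d * d ∣ b := (PySem.Int.mod_eq_zero_iff_dvd b (d*d)).mp hm
        have hb' : 0 < PySem.Int.floordiv b (d*d) := fd_pos (by nlinarith) hdvd hb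
        have hblt : PySem.Int.floordiv b (d*d) < b := fd_lt (by nlinarith) hdvd hb
        have hbdvd : PySem.Int.floordiv b (d*d) ∣ b := fd_dvd hdvd
        have hrec := ih (a * d) (PySem.Int.floordiv b (d*d)) d (by positivity) hb' hd3 hdo
          (fun hc => h4 (dvd_trans hc hbdvd))
          (fun e he3 hed heo hc => hinv e he3 hed heo (dvd_trans hc hbdvd))
          (by omega)
        have heq : racineLoopD (f+1) a b d
            = racineLoopD f (a * d) (PySem.Int.floordiv b (d*d)) d := by
          simp only [racineLoopD, if_pos hle, if_pos hm]
        rw [heq]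
        refine ⟨hrec.1, hrec.2.1, ?_, hrec.2.2.2⟩
        rw [hrec.2.2.1,
          show (a * d) ^ 2 * PySem.Int.floordiv b (d*d) =
            a ^ 2 * (PySem.Int.floordiv b (d*d) * (d * d)) from by ring,
          fd_mul_cancel hdvd]
      · have hnd : ¬ (d * d ∣ b) := fun hc => hm ((PySem.Int.mod_eq_zero_iff_dvd b (d*d)).mpr hc)
        have hrec := ih a b (d + 2) ha hb (by omega) (by omega) h4
          (by
            intro e he3 hed heo
            rcases lt_or_ge e d with h | h
            · exact hinv e he3 h heo
            · have he : e = d := by omega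
              rw [he]; exact hnd)
          (by omega)
        have heq : racineLoopD (f+1) a b d = racineLoopD f a b (d + 2) := by
          simp only [racineLoopD, if_pos hle, if_neg hm]
        rw [heq]
        exact hrec
    · have heq : racineLoopD (f+1) a b d = (a, b) := by simp only [racineLoopD, if_neg hle]
      rw [heq]
      exact ⟨ha, hb, rfl, sqf_of_inv hb (by omega) h4 hinv (not_le.mp hle)⟩

-- ===== B-side loop lemmas =====
lemma altStrip_spec : ∀ fuel (m d : Int), 2 ≤ d → 0 < m → m.natAbs ≤ fuel →
    0 < (altStrip fuel m d).1 ∧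
    d ^ (altStrip fuel m d).2 * (altStrip fuel m d).1 = m ∧
    ¬ d ∣ (altStrip fuel m d).1 := by
  intro fuel
  induction fuel with
  | zero => intro m d hd hm hf; omega
  | succ f ih =>
    intro m d hd hm hf
    by_cases h : PySem.Int.mod m d = 0
    · have hdvd : d ∣ m := (PySem.Int.mod_eq_zero_iff_dvd m d).mp h
      have hm' : 0 < PySem.Int.floordiv m d := fd_pos (by omega) hdvd hm
      have hlt : PySem.Int.floordiv m d < m := fd_lt (by omega) hdvd hm
      have hrec := ih (PySem.Int.floordiv m d) d hd hm' (by omega)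
      have heq : altStrip (f+1) m d
          = ((altStrip f (PySem.Int.floordiv m d) d).1,
             (altStrip f (PySem.Int.floordiv m d) d).2 + 1) := by
        simp only [altStrip, if_pos h]
      rw [heq]
      refine ⟨hrec.1, ?_, hrec.2.2⟩
      simp only [pow_succ]
      rw [show d ^ (altStrip f (PySem.Int.floordiv m d) d).2 * d
            * (altStrip f (PySem.Int.floordiv m d) d).1
          = d ^ (altStrip f (PySem.Int.floordiv m d) d).2
            * (altStrip f (PySem.Int.floordiv m d) d).1 * d from by ring,
        hrec.2.1, fd_mul_cancel hdvd]
    · have heq : altStrip (f+1) m d = (m, 0) := by simp only [altStrip, if_neg h]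
      rw [heq]
      exact ⟨hm, by simpa using (one_mul m),
        fun hc => h ((PySem.Int.mod_eq_zero_iff_dvd m d).mpr hc)⟩

-- a d ≥ 2 that divides m, with no divisor of m below it, is prime
lemma prime_of_min_divisor {d m : Int} (hd : 2 ≤ d) (hdm : d ∣ m) (hm : 0 < m)
    (hnos : ∀ p : Int, 2 ≤ p → p < d → ¬ p ∣ m) : Prime d := by
  by_contra hnp
  obtain ⟨q, hq, hq2, hqd, hqdvd⟩ := int_exists_prime_lt d hd hnp
  exact hnos q hq2 hqd (dvd_trans hqdvd hdm)

lemma sqfT_mul_exit {b m d : Int} (hb : 0 < b) (hm : 0 < m) (hd : 2 ≤ d)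
    (hnos : ∀ p : Int, 2 ≤ p → p < d → ¬ p ∣ m)
    (hsb : SqfT b)
    (hbf : ∀ p : Int, 2 ≤ p → Prime p → p ∣ b → p < d)
    (hlt : m < d * d) : SqfT (b * m) := by
  intro p hp2 hpp hdvd
  have hpbm : p ∣ b * m := dvd_trans ⟨p, rfl⟩ hdvd
  have hsq : p * p = p ^ 2 := by ring
  rcases hpp.dvd_mul.mp hpbm with hpb | hpm
  · have hplt : p < d := hbf p hp2 hpp hpb
    have hpnm : ¬ p ∣ m := hnos p hp2 hplt
    have : p ^ 2 ∣ b := Prime.pow_dvd_of_dvd_mul_right hpp 2 hpnm (hsq ▸ hdvd)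
    exact hsb p hp2 hpp (hsq ▸ this)
  · have hpd : d ≤ p := by
      by_contra hcon
      exact hnos p hp2 (by omega) hpm
    have hpnb : ¬ p ∣ b := fun hc => absurd (hbf p hp2 hpp hc) (by omega)
    have hp2m : p ^ 2 ∣ m := Prime.pow_dvd_of_dvd_mul_left hpp 2 hpnb (hsq ▸ hdvd)
    have hle : p * p ≤ m := Int.le_of_dvd hm (hsq ▸ hp2m)
    have : d * d ≤ p * p := mul_le_mul hpd hpd (by omega) (by omega)
    linarith

lemma altLoop_spec : ∀ fuel (a b m d : Int), 0 < a → 0 < b → 0 < m → 2 ≤ d →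
    (∀ p : Int, 2 ≤ p → p < d → ¬ p ∣ m) →
    SqfT b →
    (∀ p : Int, 2 ≤ p → Prime p → p ∣ b → p < d) →
    m.natAbs + 2 ≤ fuel + d.toNat →
    0 < (altLoop fuel a b m d).1 ∧ 0 < (altLoop fuel a b m d).2.1 ∧
    0 < (altLoop fuel a b m d).2.2 ∧
    (altLoop fuel a b m d).1 ^ 2 * ((altLoop fuel a b m d).2.1 * (altLoop fuel a b m d).2.2)
      = a ^ 2 * (b * m) ∧
    SqfT ((altLoop fuel a b m d).2.1 * (altLoop fuel a b m d).2.2) := by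
  intro fuel
  induction fuel with
  | zero =>
    intro a b m d ha hb hm hd hnos hsb hbf hf
    have hdm : m + 2 ≤ d := by omega
    have hlt : m < d * d := by nlinarith
    exact ⟨ha, hb, hm, rfl, sqfT_mul_exit hb hm hd hnos hsb hbf hlt⟩
  | succ f ih =>
    intro a b m d ha hb hm hd hnos hsb hbf hf
    by_cases hle : d * d ≤ m
    · obtain ⟨hm'pos, hprod, hndvd⟩ := altStrip_spec (m.natAbs + 1) m d hd hm (by omega)
      set m' := (altStrip (m.natAbs + 1) m d).1 with hm'def
      set e := (altStrip (m.natAbs + 1) m d).2 with hedef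
      have hm'dvd : m' ∣ m := ⟨d ^ e, by rw [← hprod]; ring⟩
      have hm'le : m' ≤ m := Int.le_of_dvd hm hm'dvd
      -- if d got stripped at least once then d divides m, hence d is prime
      have hdprime : 1 ≤ e → Prime d := by
        intro he
        have hdm : d ∣ m := by
          rw [← hprod]
          refine dvd_mul_of_dvd_left (dvd_pow_self d ?_) m'
          omega
        exact prime_of_min_divisor hd hdm hm hnos
      have hnos' : ∀ p : Int, 2 ≤ p → p < d + 1 → ¬ p ∣ m' := by
        intro p hp2 hplt hpdvd
        rcases lt_or_ge p d with h | h
        · exact hnos p hp2 h (dvd_trans hpdvd hm'dvd)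
        · have hpd : p = d := by omega
          exact hndvd (hpd ▸ hpdvd)
      have hsb' : SqfT (b * d ^ (e % 2)) := by
        rcases Nat.mod_two_eq_zero_or_one e with he | he
        · rw [he, pow_zero, mul_one]; exact hsb
        · rw [he, pow_one]
          have hdp : Prime d := hdprime (by omega)
          intro p hp2 hpp hdvd
          have hpbd : p ∣ b * d := dvd_trans ⟨p, rfl⟩ hdvd
          have hsq : p * p = p ^ 2 := by ring
          rcases hpp.dvd_mul.mp hpbd with hpb | hpd
          · have hplt : p < d := hbf p hp2 hpp hpb
            have hpnd : ¬ p ∣ d := by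
              intro hc
              exact absurd (int_prime_eq_of_dvd hpp hdp hp2 hd hc) (by omega)
            have : p ^ 2 ∣ b := Prime.pow_dvd_of_dvd_mul_right hpp 2 hpnd (hsq ▸ hdvd)
            exact hsb p hp2 hpp (hsq ▸ this)
          · have hpd' : p = d := int_prime_eq_of_dvd hpp hdp hp2 hd hpd
            subst hpd'
            have hpb : p ∣ b := Int.dvd_of_mul_dvd_mul_right (by omega) hdvd
            exact absurd (hbf p hp2 hpp hpb) (by omega)
      have hbf' : ∀ p : Int, 2 ≤ p → Prime p → p ∣ b * d ^ (e % 2) → p < d + 1 := by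
        intro p hp2 hpp hpdvd
        rcases Nat.mod_two_eq_zero_or_one e with he | he
        · rw [he, pow_zero, mul_one] at hpdvd
          exact lt_trans (hbf p hp2 hpp hpdvd) (by omega)
        · rw [he, pow_one] at hpdvd
          rcases hpp.dvd_mul.mp hpdvd with hpb | hpd
          · exact lt_trans (hbf p hp2 hpp hpb) (by omega)
          · have := int_prime_eq_of_dvd hpp (hdprime (by omega)) hp2 hd hpd
            omega
      have hrec := ih (a * d ^ (e / 2)) (b * d ^ (e % 2)) m' (d + 1)
        (by positivity) (by positivity) hm'pos (by omega) hnos' hsb' hbf' (by omega)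
      have heq : altLoop (f+1) a b m d
          = altLoop f (a * d ^ (e / 2)) (b * d ^ (e % 2)) m' (d + 1) := by
        simp only [altLoop, if_pos hle]
        rfl
      rw [heq]
      refine ⟨hrec.1, hrec.2.1, hrec.2.2.1, ?_, hrec.2.2.2.2⟩
      rw [hrec.2.2.2.1]
      have hpow : d ^ (e / 2) * d ^ (e / 2) * d ^ (e % 2) = d ^ e := by
        rw [← pow_add, ← pow_add]
        congr 1
        omega
      calc (a * d ^ (e / 2)) ^ 2 * (b * d ^ (e % 2) * m')
          = a ^ 2 * (b * (d ^ (e / 2) * d ^ (e / 2) * d ^ (e % 2) * m')) := by ring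
        _ = a ^ 2 * (b * (d ^ e * m')) := by rw [hpow]
        _ = a ^ 2 * (b * m) := by rw [show d ^ e * m' = m from hprod]
    · have heq : altLoop (f+1) a b m d = (a, b, m) := by simp only [altLoop, if_neg hle]
      rw [heq]
      have hlt : m < d * d := by omega
      exact ⟨ha, hb, hm, rfl, sqfT_mul_exit hb hm hd hnos hsb hbf hlt⟩

-- ===== uniqueness of the (square, squarefree) decomposition =====
lemma sqfT_natAbs {y : Int} (hy : 0 < y) (h : SqfT y) : Squarefree y.natAbs := by
  rw [Nat.squarefree_iff_prime_squarefree]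
  intro p hp hdvd
  have hpi : Prime (p : Int) := Nat.prime_iff_prime_int.mp hp
  have h2 : (2 : Int) ≤ (p : Int) := by exact_mod_cast hp.two_le
  apply h (p : Int) h2 hpi
  have : ((p * p : ℕ) : Int) ∣ (y.natAbs : Int) := Int.natCast_dvd_natCast.mpr hdvd
  rw [Int.natAbs_of_nonneg (by omega)] at this
  exact_mod_cast this
lemma sq_sqf_unique {x1 y1 x2 y2 : Int} (hx1 : 0 < x1) (hy1 : 0 < y1) (hx2 : 0 < x2)
    (hy2 : 0 < y2) (hs1 : SqfT y1) (hs2 : SqfT y2) (h : x1 ^ 2 * y1 = x2 ^ 2 * y2) :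
    x1 = x2 ∧ y1 = y2 := by
  have hN : x1.natAbs ^ 2 * y1.natAbs = x2.natAbs ^ 2 * y2.natAbs := by
    have := congrArg Int.natAbs h
    simpa [Int.natAbs_mul, Int.natAbs_pow] using this
  have hs1' := sqfT_natAbs hy1 hs1
  have hs2' := sqfT_natAbs hy2 hs2
  have hx1' : x1.natAbs ≠ 0 := by omega
  have hy1' : y1.natAbs ≠ 0 := by omega
  have hx2' : x2.natAbs ≠ 0 := by omega
  have hy2' : y2.natAbs ≠ 0 := by omega
  have hyeq : y1.natAbs = y2.natAbs := by
    apply Nat.eq_of_factorization_eq' hy1' hy2'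
    ext p
    have hfac := congrArg (fun t => Nat.factorization t p) hN
    simp only [Nat.factorization_mul (pow_ne_zero 2 hx1') hy1',
      Nat.factorization_mul (pow_ne_zero 2 hx2') hy2',
      Nat.factorization_pow, Finsupp.add_apply, Finsupp.smul_apply, smul_eq_mul] at hfac
    by_cases hp : p.Prime
    · have h1 := Squarefree.natFactorization_le_one p hs1'
      have h2 := Squarefree.natFactorization_le_one p hs2'
      omega
    · simp [Nat.factorization_eq_zero_of_not_prime _ hp]
  have hxeq : x1.natAbs = x2.natAbs := by
    have : x1.natAbs ^ 2 = x2.natAbs ^ 2 := by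
      rw [hyeq] at hN
      exact Nat.eq_of_mul_eq_mul_right (by omega) hN
    exact Nat.pow_left_injective (by norm_num) this
  omega

-- ===== skip lemmas (loops that never run) =====
lemma loop4_skip (fuel : Nat) (a b : Int) (h : ¬ (4:Int) ∣ b) :
    racineLoop4 fuel a b = (a, b) := by
  cases fuel with
  | zero => rfl
  | succ f =>
    have hm : ¬ PySem.Int.mod b 4 = 0 := fun hc => h ((PySem.Int.mod_eq_zero_iff_dvd b 4).mp hc)
    simp only [racineLoop4, if_neg hm]
lemma loopD_skip (fuel : Nat) (a b d : Int) (h : b < 0) :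
    racineLoopD fuel a b d = (a, b) := by
  cases fuel with
  | zero => rfl
  | succ f =>
    have hm : ¬ d * d ≤ b := by nlinarith [mul_self_nonneg d]
    simp only [racineLoopD, if_neg hm]
lemma altLoop_skip (fuel : Nat) (a b m d : Int) (h : m < 0) :
    altLoop fuel a b m d = (a, b, m) := by
  cases fuel with
  | zero => rfl
  | succ f =>
    have hm : ¬ d * d ≤ m := by nlinarith [mul_self_nonneg d]
    simp only [altLoop, if_neg hm]

-- ===== negative-input behaviour of A's first loop (for the tight claim) =====
lemma loop4_even_neg : ∀ fuel (a b : Int), b < 0 → 2 ∣ a →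
    2 ∣ (racineLoop4 fuel a b).1 ∧ (racineLoop4 fuel a b).2 < 0 := by
  intro fuel
  induction fuel with
  | zero => intro a b hb ha; exact ⟨ha, hb⟩
  | succ f ih =>
    intro a b hb ha
    by_cases h4 : PySem.Int.mod b 4 = 0
    · have heq : racineLoop4 (f+1) a b = racineLoop4 f (a * 2) (PySem.Int.floordiv b 4) := by
        simp only [racineLoop4, if_pos h4]
      rw [heq]
      exact ih (a * 2) _ (fd_neg (by norm_num) hb) ⟨a, by ring⟩
    · have heq : racineLoop4 (f+1) a b = (a, b) := by simp only [racineLoop4, if_neg h4]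
      rw [heq]
      exact ⟨ha, hb⟩

-- ===== assembly =====
lemma sqfT_one : SqfT 1 := by
  intro p hp2 _ hdvd
  have := Int.le_of_dvd one_pos hdvd
  nlinarith

lemma racine_eq_loopD (n : Int) :
    racine n = racineLoopD (2 * n.natAbs + 4) (racineLoop4 (n.natAbs + 1) 1 n).1
      (racineLoop4 (n.natAbs + 1) 1 n).2 3 := rfl

lemma main_pos (n : Int) (hn : 0 < n) : racine n = racine_alt n := by
  -- A side
  obtain ⟨ha1, hb1, hprod1, hnd1⟩ := loop4_spec (n.natAbs + 1) 1 n one_pos hn (by omega)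
  set r4 := racineLoop4 (n.natAbs + 1) 1 n with hr4def
  rw [show (1:Int)^2 * n = n from by ring] at hprod1
  have hb1le : r4.2 ≤ n := by nlinarith [hprod1, sq_nonneg (r4.1 - 1)]
  obtain ⟨hDa, hDb, hDprod, hDsqf⟩ := loopD_spec (2 * n.natAbs + 4) r4.1 r4.2 3 ha1 hb1
    (by norm_num) (by norm_num) hnd1
    (fun e he3 hed heo => (by omega : False).elim)
    (by omega)
  set rD := racineLoopD (2 * n.natAbs + 4) r4.1 r4.2 3 with hrDdef
  rw [hprod1] at hDprod
  -- B side
  obtain ⟨hBa, hBb, hBm, hBprod, hBsqf⟩ := altLoop_spec (n.natAbs + 2) 1 1 n 2 one_pos one_pos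
    hn (le_refl 2)
    (fun p hp2 hplt => (by omega : False).elim)
    sqfT_one
    (fun p hp2 _ hdvd => absurd (Int.le_of_dvd one_pos hdvd) (by omega))
    (by omega)
  set t := altLoop (n.natAbs + 2) 1 1 n 2 with htdef
  rw [show (1:Int)^2 * (1 * n) = n from by ring] at hBprod
  have halt : racine_alt n = (t.1, t.2.1 * t.2.2) := by
    by_cases h1 : t.2.2 = 1
    · simp [racine_alt, ← htdef, h1]
    · simp [racine_alt, ← htdef, h1]
  obtain ⟨hx, hy⟩ := sq_sqf_unique hDa hDb hBa (Left.mul_pos hBb hBm)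
    hDsqf hBsqf (hDprod.trans hBprod.symm)
  rw [racine_eq_loopD n, halt, ← hrDdef]
  exact Prod.ext hx hy

lemma alt_neg_eq (n : Int) (hn : n < 0) : racine_alt n = (1, n) := by
  have hne : n ≠ 1 := by omega
  have ht := altLoop_skip (n.natAbs + 2) 1 1 n 2 hn
  simp [racine_alt, ht, hne]

lemma main_neg (n : Int) (hn : n < 0) (h4 : ¬ (4:Int) ∣ n) : racine n = racine_alt n := by
  have hA : racine n = (1, n) := by
    rw [racine_eq_loopD n, loop4_skip _ _ _ h4, loopD_skip _ _ _ _ hn]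
  rw [hA, alt_neg_eq n hn]

theorem main_all (n : Int) (hpre : n ≠ 0) (hnd : ¬ (n < 0 ∧ (4:Int) ∣ n)) :
    racine n = racine_alt n := by
  rcases lt_trichotomy n 0 with h | h | h
  · exact main_neg n h (fun hc => hnd ⟨h, hc⟩)
  · exact absurd h hpre
  · exact main_pos n h

theorem main_tight (n : Int) (hn : n < 0) (hdvd : (4:Int) ∣ n) :
    racine n ≠ racine_alt n := by
  have hm : PySem.Int.mod n 4 = 0 := (PySem.Int.mod_eq_zero_iff_dvd n 4).mpr hdvd
  have h1 : racineLoop4 (n.natAbs + 1) 1 n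
      = racineLoop4 n.natAbs (1 * 2) (PySem.Int.floordiv n 4) := by
    simp only [racineLoop4, if_pos hm]
  have hev := loop4_even_neg n.natAbs (1 * 2) (PySem.Int.floordiv n 4)
    (fd_neg (by norm_num) hn) ⟨1, by ring⟩
  rw [← h1] at hev
  have hA : racine n
      = ((racineLoop4 (n.natAbs + 1) 1 n).1, (racineLoop4 (n.natAbs + 1) 1 n).2) := by
    rw [racine_eq_loopD n, loopD_skip _ _ _ _ hev.2]
  intro hc
  rw [hA, alt_neg_eq n hn] at hc
  have h2 : (racineLoop4 (n.natAbs + 1) 1 n).1 = 1 := congrArg Prod.fst hc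
  rw [h2] at hev
  omega

-- ===== VERDICT (by name: the statement is the Claim_ definition above) =====
theorem racine_spec : Claim_unchanged_racine := by
  intro n hdom hpre hnd
  have hnd' : ¬ (n < 0 ∧ (4:Int) ∣ n) := hnd
  exact main_all n hpre hnd'

theorem racine_changed : Claim_changed_racine := by
  unfold Claim_changed_racine; decide

theorem racine_tight : Claim_exact_racine := by
  intro n hdom hpre hD
  have hD' : n < 0 ∧ (4:Int) ∣ n := hD
  exact main_tight n hD'.1 hD'.2
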